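-- pv_equiv track=rewrite | github.com/ControlNet/envira | files/fix_zellij_kdl.py | iter_line_ranges
-- ===== SOURCE A (Python) =====
-- def iter_line_ranges(text: str):
--     start = 0
--     while True:
--         end = text.find("\n", start)
--         if end == -1:
--             yield start, len(text)
--             break
--         yield start, end
--         start = end + 1
-- ===== SOURCE B (Python) =====
-- def iter_line_ranges(text: str):
--     start = 0
--     for line in text.split("\n"):
--         end = start + len(line)
--         yield start, end
--         start = end + 1
-- ===== Notes on version B (the rewrite author's own statement) =====
-- stated objective: idiomatic
-- what changed: B partitions the text with str.split on the newline separator and reconstructs each (start,end) range from a running offset over the pieces' lengths, instead of A's while-loop that repeatedly scans for the next newline position with str.find.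
import Mathlib
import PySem

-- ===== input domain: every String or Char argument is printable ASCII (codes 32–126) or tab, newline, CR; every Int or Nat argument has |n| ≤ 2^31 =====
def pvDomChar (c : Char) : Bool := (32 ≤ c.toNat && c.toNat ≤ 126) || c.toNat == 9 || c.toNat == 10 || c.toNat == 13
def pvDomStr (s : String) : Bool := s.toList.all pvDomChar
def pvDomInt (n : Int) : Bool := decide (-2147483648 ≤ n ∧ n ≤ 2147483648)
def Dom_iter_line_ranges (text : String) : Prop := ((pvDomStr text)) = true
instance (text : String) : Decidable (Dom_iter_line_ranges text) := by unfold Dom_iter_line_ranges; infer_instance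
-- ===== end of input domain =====

-- B is an idiomatic re-decomposition: split('\n') plus a running offset, instead of A's find-loop; same O(n) cost.

-- ===== PORT A =====
-- A's while-loop: end = text.find('\n', start); yield (start, end) until find returns -1,
-- then yield (start, len(text)).  Terminates because each found newline index is ≥ start.
def pvGoA (s : List Char) (start : Nat) (h : start ≤ s.length) : List (Int × Int) :=
  if he : PySem.Chars.findFrom s ['\n'] (start : Int) = -1 then
    [((start : Int), (s.length : Int))]
  else
    have hs := PySem.Chars.findFrom_natCast_spec s ['\n'] start h he
    have hlt : (PySem.Chars.findFrom s ['\n'] (start : Int)).toNat < s.length := by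
      rcases hs.2.1 with ⟨t, ht⟩
      have hne : s.drop (PySem.Chars.findFrom s ['\n'] (start : Int)).toNat ≠ [] := by
        rw [← ht]; simp
      rw [ne_eq, List.drop_eq_nil_iff] at hne
      omega
    ((start : Int), PySem.Chars.findFrom s ['\n'] (start : Int)) ::
      pvGoA s ((PySem.Chars.findFrom s ['\n'] (start : Int)).toNat + 1) (by omega)
termination_by s.length - start
decreasing_by
  have _h1 : (start : Int) ≤ PySem.Chars.findFrom s ['\n'] (start : Int) := hs.1
  omega

def iter_line_ranges (text : String) : List (Int × Int) :=
  pvGoA text.toList 0 (by simp)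

-- ===== PORT B =====
-- Source B: for line in text.split('\n'): end = start + len(line); yield (start, end); start = end + 1
def iter_line_ranges_alt (text : String) : List (Int × Int) :=
  let parts := PySem.Chars.splitOn text.toList ['\n']
  (parts.foldl
    (fun (st : Int × List (Int × Int)) line =>
      let endv := st.1 + PySem.Chars.len line
      (endv + 1, st.2 ++ [(st.1, endv)]))
    ((0 : Int), ([] : List (Int × Int)))).2

-- ===== PRECONDITION & SPEC =====
def Spec_iter_line_ranges (text : String) (out : List (Int × Int)) : Prop := out = iter_line_ranges_alt text
instance (text : String) (out : List (Int × Int)) : Decidable (Spec_iter_line_ranges text out) := by unfold Spec_iter_line_ranges; infer_instance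

-- ===== CLAIM (what is proved, stated in full; the proofs are below) =====
def Claim_equal_iter_line_ranges : Prop := ∀ (text : String), Dom_iter_line_ranges text → Spec_iter_line_ranges text (iter_line_ranges text)

-- ===== LEMMAS AND PROOFS =====

-- Reference single pass: pvRanges cs start i emits (start, i) at each '\n' and at the end;
-- start is the current line's start index, i the absolute index of the next char.
def pvRanges : List Char → Nat → Nat → List (Int × Int)
  | [], start, i => [((start : Int), (i : Int))]
  | c :: rest, start, i =>
      if c = '\n' then ((start : Int), (i : Int)) :: pvRanges rest (i + 1) (i + 1)
      else pvRanges rest start (i + 1)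

-- splitOn's accumulator recursion, fuel-free
def pvSplitAcc : List Char → List Char → List (List Char)
  | [], cur => [cur.reverse]
  | c :: rest, cur =>
      if c = '\n' then cur.reverse :: pvSplitAcc rest [] else pvSplitAcc rest (c :: cur)

-- emitting ranges from the list of pieces
def pvEmit : List (List Char) → Int → List (Int × Int)
  | [], _ => []
  | p :: ps, st => (st, st + (p.length : Int)) :: pvEmit ps (st + (p.length : Int) + 1)

theorem pvSplitOn_go_spec (fuel : Nat) (l cur : List Char) (acc : List (List Char))
    (h : l.length < fuel) :
    PySem.Chars.splitOn.go ['\n'] fuel l cur acc = acc.reverse ++ pvSplitAcc l cur := by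
  induction fuel generalizing l cur acc with
  | zero => omega
  | succ n ih =>
    cases l with
    | nil => simp [PySem.Chars.splitOn.go, pvSplitAcc]
    | cons c rest =>
      have hn : rest.length < n := by simpa using Nat.lt_of_succ_lt_succ h
      by_cases hc : c = '\n'
      · subst hc
        rw [show PySem.Chars.splitOn.go ['\n'] (n + 1) ('\n' :: rest) cur acc =
              PySem.Chars.splitOn.go ['\n'] n rest [] (cur.reverse :: acc) from by
            simp [PySem.Chars.splitOn.go, List.isPrefixOf]]
        rw [ih rest [] _ hn]
        simp [pvSplitAcc]
      · rw [show PySem.Chars.splitOn.go ['\n'] (n + 1) (c :: rest) cur acc =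
              PySem.Chars.splitOn.go ['\n'] n rest (c :: cur) acc from by
            simp [PySem.Chars.splitOn.go, List.isPrefixOf, Ne.symm hc]]
        rw [ih rest (c :: cur) acc hn]
        simp [pvSplitAcc, hc]

theorem pvSplitOn_eq (s : List Char) :
    PySem.Chars.splitOn s ['\n'] = pvSplitAcc s [] := by
  unfold PySem.Chars.splitOn
  rw [pvSplitOn_go_spec (s.length + 1) s [] [] (by omega)]
  simp

theorem pvEmit_splitAcc (cs : List Char) (cur : List Char) (start : Nat) :
    pvEmit (pvSplitAcc cs cur) (start : Int) = pvRanges cs start (start + cur.length) := by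
  induction cs generalizing cur start with
  | nil => simp [pvSplitAcc, pvEmit, pvRanges]
  | cons c rest ih =>
    by_cases hc : c = '\n'
    · subst hc
      rw [show pvSplitAcc ('\n' :: rest) cur = cur.reverse :: pvSplitAcc rest [] from by
            simp [pvSplitAcc]]
      rw [show pvRanges ('\n' :: rest) start (start + cur.length) =
            ((start : Int), ((start + cur.length : Nat) : Int)) ::
              pvRanges rest (start + cur.length + 1) (start + cur.length + 1) from by
            simp [pvRanges]]
      simp only [pvEmit, List.length_reverse]
      have h2 := ih [] (start + cur.length + 1)
      simp only [List.length_nil, Nat.add_zero] at h2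
      rw [show ((start + cur.length + 1 : Nat) : Int) = (start : Int) + (cur.length : Int) + 1 from by
            push_cast; ring] at h2
      rw [h2]
      norm_cast
    · rw [show pvSplitAcc (c :: rest) cur = pvSplitAcc rest (c :: cur) from by
            simp [pvSplitAcc, hc]]
      rw [show pvRanges (c :: rest) start (start + cur.length) =
            pvRanges rest start (start + cur.length + 1) from by simp [pvRanges, hc]]
      have h2 := ih (c :: cur) start
      simp only [List.length_cons] at h2
      rw [show start + cur.length + 1 = start + (cur.length + 1) from by omega]
      exact h2

theorem pvFoldl_emit (ps : List (List Char)) (st : Int) (acc : List (Int × Int)) :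
    (ps.foldl
      (fun (p : Int × List (Int × Int)) line =>
        let endv := p.1 + PySem.Chars.len line
        (endv + 1, p.2 ++ [(p.1, endv)]))
      (st, acc)).2 = acc ++ pvEmit ps st := by
  induction ps generalizing st acc with
  | nil => simp [pvEmit]
  | cons p ps ih =>
    simp only [List.foldl_cons, pvEmit]
    rw [ih]
    simp [PySem.Chars.len]

theorem pvRanges_no_newline (d : List Char) (hd : '\n' ∉ d) (start i : Nat) :
    pvRanges d start i = [((start : Int), ((i + d.length : Nat) : Int))] := by
  induction d generalizing i with
  | nil => simp [pvRanges]
  | cons c rest ih =>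
    have hc : c ≠ '\n' := fun h => hd (h ▸ List.mem_cons_self)
    have hr : '\n' ∉ rest := fun h => hd (List.mem_cons_of_mem _ h)
    simp only [pvRanges, if_neg hc]
    rw [ih hr (i + 1)]
    congr 2
    simp only [List.length_cons]
    omega

theorem pvRanges_split (d1 d2 : List Char) (hd : '\n' ∉ d1) (start i : Nat) :
    pvRanges (d1 ++ '\n' :: d2) start i =
      ((start : Int), ((i + d1.length : Nat) : Int)) ::
        pvRanges d2 (i + d1.length + 1) (i + d1.length + 1) := by
  induction d1 generalizing i with
  | nil => simp [pvRanges]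
  | cons c rest ih =>
    have hc : c ≠ '\n' := fun h => hd (h ▸ List.mem_cons_self)
    have hr : '\n' ∉ rest := fun h => hd (List.mem_cons_of_mem _ h)
    simp only [List.cons_append, pvRanges, if_neg hc]
    rw [ih hr (i + 1)]
    simp only [List.length_cons]
    congr 2 <;> omega

theorem pvGoA_eq (s : List Char) (start : Nat) (h : start ≤ s.length) :
    pvGoA s start h = pvRanges (s.drop start) start start := by
  induction start, h using pvGoA.induct with
  | case1 start h he =>
    rw [pvGoA, dif_pos he]
    have hnin : '\n' ∉ s.drop start := by
      have := (PySem.Chars.findFrom_natCast_eq_neg_one_iff s ['\n'] start h).mp he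
      intro hm
      exact this (List.infix_iff_prefix_suffix.mpr (by
        rcases List.mem_iff_append.mp hm with ⟨l1, l2, hl⟩
        exact ⟨'\n' :: l2, ⟨l2, rfl⟩, ⟨l1, by simpa using hl.symm⟩⟩))
    rw [pvRanges_no_newline _ hnin]
    have : start + (s.drop start).length = s.length := by
      simp [List.length_drop]; omega
    rw [this]
  | case2 start h he hs hlt ih =>
    rw [pvGoA, dif_neg he]
    set e := PySem.Chars.findFrom s ['\n'] (start : Int) with hedef
    have h1 : (start : Int) ≤ e := hs.1
    have hj : start ≤ e.toNat := by omega
    have hjl : e.toNat < s.length := hlt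
    -- decompose s.drop start
    have hdropj : s.drop e.toNat = '\n' :: s.drop (e.toNat + 1) := by
      rcases hs.2.1 with ⟨t, ht⟩
      rw [← ht]
      have : (s.drop e.toNat).tail = s.drop (e.toNat + 1) := by
        rw [List.tail_drop]
      rw [← this, ← ht]
      simp
    have hsplit : s.drop start = (s.drop start).take (e.toNat - start) ++ '\n' :: s.drop (e.toNat + 1) := by
      conv_lhs => rw [← List.take_append_drop (e.toNat - start) (s.drop start)]
      congr 1
      rw [List.drop_drop]
      rw [show start + (e.toNat - start) = e.toNat from by omega]
      exact hdropj
    have hnin : '\n' ∉ (s.drop start).take (e.toNat - start) := by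
      intro hm
      rcases List.mem_iff_getElem.mp hm with ⟨k, hk, hget⟩
      have hk' : k < e.toNat - start := lt_of_lt_of_le hk (by simp)
      have hkl : start + k < s.length := by omega
      have hget' : s[start + k]'hkl = '\n' := by
        rw [List.getElem_take] at hget
        rw [List.getElem_drop] at hget
        exact hget
      have hpre : ['\n'] <+: s.drop (start + k) := by
        rw [List.drop_eq_getElem_cons hkl, hget']
        exact ⟨_, rfl⟩
      exact hs.2.2 (start + k) (by omega) (by omega) hpre
    have hlen : ((s.drop start).take (e.toNat - start)).length = e.toNat - start := by
      simp [List.length_take, List.length_drop]; omega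
    rw [hsplit, pvRanges_split _ _ hnin, hlen]
    rw [show start + (e.toNat - start) = e.toNat from by omega]
    rw [show ((e.toNat : Nat) : Int) = e from by omega]
    exact congrArg (((start : Int), e) :: ·) ih

-- ===== VERDICT (by name: the statement is the Claim_ definition above) =====
theorem iter_line_ranges_spec : Claim_equal_iter_line_ranges := by
  intro text _
  unfold Spec_iter_line_ranges iter_line_ranges iter_line_ranges_alt
  rw [pvGoA_eq text.toList 0 (by simp), pvSplitOn_eq, pvFoldl_emit]
  have := pvEmit_splitAcc text.toList [] 0
  simpa using this.symm
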